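-- pv_equiv track=rewrite | github.com/UseTheApi/algorithms | python/trees/tree_combinations.py | n_trees
-- ===== SOURCE A (Python) =====
-- def n_trees(num, cur=1):
--     if cur > num:
--         return 0
--     if cur == num:
--         return 1
--
--     if num - cur > 2:
--         tmp = n_trees(num, cur+2) * 2
--     else:
--         tmp = n_trees(num, cur+2)
--     return tmp + n_trees(num, cur+1) * 2
-- ===== SOURCE B (Python) =====
-- def n_trees(num, cur=1):
--     d = num - cur
--     if d < 0:
--         return 0
--     prev2, prev = 0, 1
--     for k in range(1, d + 1):
--         prev2, prev = prev, (2 * prev2 if k > 2 else prev2) + 2 * prev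
--     return prev
-- ===== Notes on version B (the rewrite author's own statement) =====
-- stated objective: alternative
-- what changed: Replaced the branching two-call recursion with a bottom-up loop over d = num - cur that keeps only the last two values of the recurrence.
import Mathlib
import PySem

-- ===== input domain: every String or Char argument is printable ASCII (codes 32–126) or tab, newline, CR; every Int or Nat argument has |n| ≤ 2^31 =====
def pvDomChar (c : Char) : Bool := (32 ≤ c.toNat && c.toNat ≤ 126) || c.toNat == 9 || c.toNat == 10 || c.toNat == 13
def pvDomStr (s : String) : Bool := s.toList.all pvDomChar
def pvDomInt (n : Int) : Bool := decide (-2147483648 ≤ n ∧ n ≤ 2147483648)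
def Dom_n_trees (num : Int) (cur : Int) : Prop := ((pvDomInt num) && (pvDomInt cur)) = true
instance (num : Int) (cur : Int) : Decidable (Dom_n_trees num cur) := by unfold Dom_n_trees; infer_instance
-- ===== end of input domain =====

-- B replaces A's branching two-call recursion by a bottom-up loop over d = num - cur keeping the last two values.

-- ===== PORT A =====
def n_trees (num : Int) (cur : Int) : Int :=
  if cur > num then 0
  else if cur = num then 1
  else
    let tmp := if num - cur > 2 then n_trees num (cur + 2) * 2 else n_trees num (cur + 2)
    tmp + n_trees num (cur + 1) * 2
termination_by (num - cur).toNat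
decreasing_by all_goals omega

-- ===== PORT B =====
def nTreesStep (s : Int × Int) (k : Int) : Int × Int :=
  (s.2, (if k > 2 then 2 * s.1 else s.1) + 2 * s.2)

def n_trees_alt (num : Int) (cur : Int) : Int :=
  let d := num - cur
  if d < 0 then 0
  else ((PySem.List.pyRange 1 (d + 1) 1).foldl nTreesStep (0, 1)).2

-- ===== PRECONDITION & SPEC =====
-- Pre_ excludes inputs with num - cur > 900: there A's recursion reaches depth num - cur and
-- exceeds CPython's default recursion limit, raising RecursionError instead of returning.
def Pre_n_trees (num : Int) (cur : Int) : Prop := num - cur ≤ 900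
instance (num : Int) (cur : Int) : Decidable (Pre_n_trees num cur) := by unfold Pre_n_trees; infer_instance
def pvWitness_n_trees : Int × Int := (10, 1)

def Spec_n_trees (num : Int) (cur : Int) (out : Int) : Prop := out = n_trees_alt num cur
instance (num : Int) (cur : Int) (out : Int) : Decidable (Spec_n_trees num cur out) := by unfold Spec_n_trees; infer_instance

-- ===== CLAIM (what is proved, stated in full; the proofs are below) =====
def Claim_equal_n_trees : Prop := ∀ (num : Int) (cur : Int), Dom_n_trees num cur → Pre_n_trees num cur → Spec_n_trees num cur (n_trees num cur)

-- ===== LEMMAS AND PROOFS =====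

-- the value of the recurrence at distance d = num - cur (reference function for both sides)
def nTreesVal : Nat → Int
  | 0 => 1
  | 1 => 2
  | 2 => 5
  | n + 3 => 2 * nTreesVal (n + 1) + 2 * nTreesVal (n + 2)

lemma n_trees_eq_val (num cur : Int) :
    n_trees num cur = if num < cur then 0 else nTreesVal (num - cur).toNat := by
  by_cases h : num < cur
  · rw [n_trees]; simp [h]
  · rw [not_lt] at h
    generalize hd : (num - cur).toNat = d
    induction d using Nat.strong_induction_on generalizing num cur with
    | _ d ih =>
      rw [n_trees]
      by_cases h0 : cur = num
      · have : d = 0 := by omega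
        simp [h0, this, nTreesVal]
      · have hlt : cur < num := by omega
        have hd1 : 1 ≤ d := by omega
        simp only [show ¬ cur > num by omega, if_false, h0, if_false]
        have h1 : n_trees num (cur + 1) = nTreesVal (d - 1) := by
          rw [ih (d - 1) (by omega) num (cur + 1) (by omega) (by omega)]
          simp [show ¬ num < cur + 1 by omega]
        by_cases h2 : num - cur > 2
        · have e2 : n_trees num (cur + 2) = nTreesVal (d - 2) := by
            rw [ih (d - 2) (by omega) num (cur + 2) (by omega) (by omega)]
            simp [show ¬ num < cur + 2 by omega]
          simp only [h2, if_true, e2, h1]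
          have hd3 : 3 ≤ d := by omega
          obtain ⟨m, rfl⟩ : ∃ m, d = m + 3 := ⟨d - 3, by omega⟩
          show nTreesVal (m + 1) * 2 + nTreesVal (m + 2) * 2 = nTreesVal (m + 3)
          rw [show nTreesVal (m + 3) = 2 * nTreesVal (m + 1) + 2 * nTreesVal (m + 2) from rfl]
          ring
        · -- d = 1 or d = 2
          simp only [h2, if_false, h1]
          have hub : d ≤ 2 := by omega
          interval_cases d
          · -- d = 1 : recursive call at cur+2 is past num
            have e2 : n_trees num (cur + 2) = 0 := by
              rw [n_trees]; simp [show cur + 2 > num by omega]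
            rw [e2]; simp [nTreesVal]
          · -- d = 2
            have e2 : n_trees num (cur + 2) = nTreesVal 0 := by
              rw [ih 0 (by omega) num (cur + 2) (by omega) (by omega)]
              simp [show ¬ num < cur + 2 by omega]
            rw [e2]; simp [nTreesVal]

-- the foldl state after processing range(1, d+1) holds (val (d-1) [or 0 at d=0], val d)
lemma foldl_state (d : Nat) :
    (PySem.List.pyRange 1 ((d : Int) + 1) 1).foldl nTreesStep (0, 1)
      = (if d = 0 then 0 else nTreesVal (d - 1), nTreesVal d) := by
  induction d with
  | zero => simp [PySem.List.pyRange_one_eq_nil, nTreesVal]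
  | succ n ih =>
    rw [show ((n + 1 : Nat) : Int) + 1 = ((n : Int) + 1) + 1 by push_cast; ring,
        PySem.List.pyRange_one_succ_right (by omega), List.foldl_append, ih]
    simp only [List.foldl_cons, List.foldl_nil, nTreesStep]
    by_cases h0 : n = 0
    · subst h0; norm_num [nTreesVal]
    · by_cases h1 : n = 1
      · subst h1; norm_num [nTreesVal]
      · by_cases h2 : n = 2
        · subst h2; norm_num [nTreesVal]
        · have h3 : 3 ≤ n := by omega
          obtain ⟨m, rfl⟩ : ∃ m, n = m + 3 := ⟨n - 3, by omega⟩
          rw [if_pos (by push_cast; omega)]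
          simp only [if_neg (by omega : ¬ (m + 3 = 0)), if_neg (by omega : ¬ (m + 3 + 1 = 0)),
            Prod.mk.injEq, show m + 3 - 1 = m + 2 from rfl, show m + 3 + 1 - 1 = m + 3 from rfl,
            show m + 3 + 1 = m + 4 from rfl]
          exact ⟨trivial, rfl⟩

lemma n_trees_alt_eq_val (num cur : Int) :
    n_trees_alt num cur = if num < cur then 0 else nTreesVal (num - cur).toNat := by
  unfold n_trees_alt
  by_cases h : num < cur
  · simp [show num - cur < 0 by omega, h]
  · have h0 : ¬ (num - cur < 0) := by omega
    have hc : ((num - cur).toNat : Int) = num - cur := by omega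
    simp only [h0, if_false, h, if_false]
    conv_lhs => rw [← hc, foldl_state]

-- ===== VERDICT (by name: the statement is the Claim_ definition above) =====
theorem n_trees_spec : Claim_equal_n_trees := by
  intro num cur _ _
  unfold Spec_n_trees
  rw [n_trees_eq_val, n_trees_alt_eq_val]
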